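-- pv_equiv track=rewrite | github.com/KeithSloan/FreeCAD_ImportNURBS | freecad/importNURBS/import3DM.py | getFCKnots
-- ===== SOURCE A (Python) =====
-- def getFCKnots(fknots):
--     k = list(fknots)
--     mults = []
--     knots = list(set(k))
--     knots.sort()
--     for kn in knots:
--         mults.append(k.count(kn))
--     mults[0] += 1
--     mults[-1] += 1
--     return knots, mults
-- ===== SOURCE B (Python) =====
-- def getFCKnots(fknots):
--     ks = sorted(fknots)
--     knots = []
--     mults = []
--     i = 0
--     n = len(ks)
--     while i < n:
--         j = i + 1
--         while j < n and ks[j] == ks[i]: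
--             j += 1
--         knots.append(ks[i])
--         mults.append(j - i)
--         i = j
--     mults[0] += 1
--     mults[-1] += 1
--     return knots, mults
-- ===== Notes on version B (the rewrite author's own statement) =====
-- stated objective: faster
-- what changed: Instead of building a set, sorting it, and calling list.count once per distinct knot (an inner scan per knot), B sorts the input once and walks it in a single pass, grouping consecutive equal values into runs whose lengths are the multiplicities; Pre_ excludes only the empty list, on which both A and B raise IndexError when incrementing the first multiplicity.
import Mathlib
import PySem

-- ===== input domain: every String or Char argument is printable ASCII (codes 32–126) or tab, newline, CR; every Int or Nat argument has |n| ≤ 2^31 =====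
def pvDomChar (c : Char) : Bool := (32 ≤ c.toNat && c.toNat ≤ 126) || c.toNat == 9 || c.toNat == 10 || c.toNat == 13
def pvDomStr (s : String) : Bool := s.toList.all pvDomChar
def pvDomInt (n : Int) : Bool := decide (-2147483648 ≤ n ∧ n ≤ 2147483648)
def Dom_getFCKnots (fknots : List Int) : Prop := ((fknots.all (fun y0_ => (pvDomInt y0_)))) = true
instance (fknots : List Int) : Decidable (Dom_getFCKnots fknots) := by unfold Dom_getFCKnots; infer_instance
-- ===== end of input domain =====

-- B sorts the input once and reads multiplicities off run lengths in one pass,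
-- instead of A's set + sort + per-knot list.count; timing run measures the speedup.


-- ===== PORT A =====
-- the first-slot increment (Python raises IndexError on the empty list; excluded by Pre_)
def bumpFirst (m : List Int) : List Int :=
  match m with
  | [] => []
  | x :: xs => (x + 1) :: xs

-- the last-slot increment (Python raises IndexError on the empty list; excluded by Pre_)
def bumpLast (m : List Int) : List Int :=
  match m with
  | [] => []
  | [x] => [x + 1]
  | x :: xs => x :: bumpLast xs

def getFCKnots (fknots : List Int) : List Int × List Int :=
  let k := fknots
  -- knots = list(set(k)); knots.sort()
  let knots := PySem.List.sorted (PySem.Set.ofList k) (fun x => x) false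
  -- for kn in knots: mults.append(k.count(kn))
  let mults := knots.map (fun kn => (PySem.List.count k kn : Int))
  (knots, bumpLast (bumpFirst mults))

-- ===== PORT B =====
-- the inner while loop scanning one run of equal values, and the outer loop advancing i to j
def pyGroup (s : List Int) : List (Int × Int) :=
  match s with
  | [] => []
  | v :: rest =>
      (v, 1 + ((rest.takeWhile (· == v)).length : Int)) :: pyGroup (rest.dropWhile (· == v))
termination_by s.length
decreasing_by simp; exact List.length_dropWhile_le _ _

def getFCKnots_alt (fknots : List Int) : List Int × List Int :=
  let ks := PySem.List.sorted fknots (fun x => x) false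
  let g := pyGroup ks
  let knots := g.map Prod.fst
  let mults := g.map Prod.snd
  (knots, bumpLast (bumpFirst mults))

-- ===== PRECONDITION & SPEC =====
-- Pre_ excludes only the empty list: there Python A (and Python B) raises IndexError at the first-slot increment.
def Pre_getFCKnots (fknots : List Int) : Prop := fknots ≠ []
instance (fknots : List Int) : Decidable (Pre_getFCKnots fknots) := by unfold Pre_getFCKnots; infer_instance
def pvWitness_getFCKnots : List Int := [3, 1, 1, 2, 3]

def Spec_getFCKnots (fknots : List Int) (out : List Int × List Int) : Prop := out = getFCKnots_alt fknots
instance (fknots : List Int) (out : List Int × List Int) : Decidable (Spec_getFCKnots fknots out) := by unfold Spec_getFCKnots; infer_instance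

-- ===== CLAIM (what is proved, stated in full; the proofs are below) =====
def Claim_equal_getFCKnots : Prop := ∀ (fknots : List Int), Dom_getFCKnots fknots → Pre_getFCKnots fknots → Spec_getFCKnots fknots (getFCKnots fknots)

-- ===== LEMMAS AND PROOFS =====

-- after dropping the leading run of v's from a sorted list whose elements are all ≥ v, everything is > v
lemma dropWhile_gt (v : Int) (l : List Int) (hp : l.Pairwise (· ≤ ·)) (hge : ∀ y ∈ l, v ≤ y) :
    ∀ x ∈ l.dropWhile (· == v), v < x := by
  induction l with
  | nil => intro x hx; simp at hx
  | cons a l' ih =>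
    intro x hx
    rw [List.dropWhile_cons] at hx
    split_ifs at hx with ha
    · exact ih hp.of_cons (fun y hy => hge y (List.mem_cons_of_mem _ hy)) x hx
    · have hva : v < a := by
        have hle : v ≤ a := hge a List.mem_cons_self
        rcases lt_or_eq_of_le hle with h | h
        · exact h
        · exact absurd (by simp [h.symm]) ha
      rcases List.mem_cons.mp hx with h | h
      · simpa [h] using hva
      · exact lt_of_lt_of_le hva (List.rel_of_pairwise_cons hp h)

-- on a sorted list, pyGroup yields strictly increasing first components that enumerate
-- exactly the members, and each second component is the count of its first component
lemma group_spec (s : List Int) (hs : s.Pairwise (· ≤ ·)) :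
    ((pyGroup s).map Prod.fst).Pairwise (· < ·) ∧
    (∀ x, x ∈ (pyGroup s).map Prod.fst ↔ x ∈ s) ∧
    (∀ p ∈ pyGroup s, p.2 = (List.count p.1 s : Int)) := by
  induction s using pyGroup.induct with
  | case1 => simp [pyGroup]
  | case2 v rest ih =>
    have hv : ∀ y ∈ rest, v ≤ y := fun y hy => List.rel_of_pairwise_cons hs hy
    have hr : rest.Pairwise (· ≤ ·) := hs.of_cons
    have hdp : (rest.dropWhile (· == v)).Pairwise (· ≤ ·) :=
      List.Pairwise.sublist (List.dropWhile_sublist _) hr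
    have hgt : ∀ x ∈ rest.dropWhile (· == v), v < x := dropWhile_gt v rest hr hv
    obtain ⟨ilt, imem, icnt⟩ := ih hdp
    have htv : ∀ x ∈ rest.takeWhile (· == v), x = v := by
      intro x hx
      simpa using List.mem_takeWhile_imp hx
    have hrest : ∀ x, x ∈ rest ↔ x ∈ rest.takeWhile (· == v) ∨ x ∈ rest.dropWhile (· == v) := by
      intro x
      conv_lhs => rw [← List.takeWhile_append_dropWhile (p := (· == v)) (l := rest)]
      exact List.mem_append
    rw [pyGroup]
    refine ⟨?_, ?_, ?_⟩
    · simp only [List.map_cons, List.pairwise_cons]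
      exact ⟨fun x hx => hgt x ((List.mem_map.mp hx).elim fun p hp => hp.2 ▸ (imem x).mp (hp.2 ▸ List.mem_map_of_mem hp.1)), ilt⟩
    · intro x
      simp only [List.map_cons, List.mem_cons, imem, hrest x]
      constructor
      · rintro (h | h)
        · exact Or.inl h
        · exact Or.inr (Or.inr h)
      · rintro (h | h | h)
        · exact Or.inl h
        · exact Or.inl (htv x h)
        · exact Or.inr h
    · intro p hp
      rcases List.mem_cons.mp hp with h | h
      · subst h
        simp only
        have h1 : List.count v (rest.takeWhile (· == v)) = (rest.takeWhile (· == v)).length :=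
          List.count_eq_length.mpr (fun b hb => (htv b hb).symm)
        have h2 : List.count v (rest.dropWhile (· == v)) = 0 :=
          List.count_eq_zero.mpr (fun hmem => lt_irrefl v (hgt v hmem))
        have h3 : List.count v (v :: rest) = (rest.takeWhile (· == v)).length + 1 := by
          conv_lhs => rw [← List.takeWhile_append_dropWhile (p := (· == v)) (l := rest)]
          rw [List.count_cons_self, List.count_append, h1, h2]
        rw [h3]
        push_cast
        ring
      · have hp1d : p.1 ∈ rest.dropWhile (· == v) :=
          (imem p.1).mp (List.mem_map_of_mem h)
        have hpv : v < p.1 := hgt _ hp1d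
        have hcv : List.count p.1 (v :: rest) = List.count p.1 (rest.dropWhile (· == v)) := by
          conv_lhs => rw [← List.takeWhile_append_dropWhile (p := (· == v)) (l := rest)]
          rw [List.count_cons_of_ne (by exact fun he => absurd he.symm (ne_of_gt hpv)), List.count_append]
          have : List.count p.1 (rest.takeWhile (· == v)) = 0 :=
            List.count_eq_zero.mpr (fun hm => (ne_of_gt hpv) (htv _ hm))
          omega
        rw [hcv]
        exact icnt p h

-- ===== VERDICT (by name: the statement is the Claim_ definition above) =====
theorem getFCKnots_spec : Claim_equal_getFCKnots := by
  intro fknots _ _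
  unfold Spec_getFCKnots getFCKnots getFCKnots_alt
  simp only
  have hs : (PySem.List.sorted fknots (fun x => x) false).Pairwise (· ≤ ·) :=
    PySem.List.sorted_pairwise fknots (fun x => x)
  obtain ⟨hlt, hmem, hcnt⟩ := group_spec (PySem.List.sorted fknots (fun x => x) false) hs
  have hknots : PySem.List.sorted (PySem.Set.ofList fknots) (fun x => x) false
      = (pyGroup (PySem.List.sorted fknots (fun x => x) false)).map Prod.fst := by
    apply PySem.List.sorted_eq_of_perm_of_pairwise_lt
    · rw [List.perm_ext_iff_of_nodup (hlt.imp (fun h => ne_of_lt h)) (PySem.Set.nodup_ofList fknots)]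
      intro a
      rw [hmem a, PySem.Set.mem_ofList, PySem.List.mem_sorted]
    · exact hlt
  have hcount : ∀ a, PySem.List.count fknots a
      = List.count a (PySem.List.sorted fknots (fun x => x) false) := by
    intro a
    rw [PySem.List.count_eq]
    exact ((PySem.List.sorted_perm fknots (fun x => x) false).count_eq a).symm
  have hmults : (PySem.List.sorted (PySem.Set.ofList fknots) (fun x => x) false).map
        (fun kn => (PySem.List.count fknots kn : Int))
      = (pyGroup (PySem.List.sorted fknots (fun x => x) false)).map Prod.snd := by
    rw [hknots, List.map_map]
    apply List.map_congr_left
    intro p hp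
    simp only [Function.comp]
    rw [hcount p.1, ← hcnt p hp]
  rw [hmults, hknots]
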